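/- GENERATED by farm/mkstatement.py from design/units.split.tsv — do not edit.
   THE SPLIT of the proof unit `start_decoder.R12` into `start_decoder.R12a`, `start_decoder.R12b`, `start_decoder.R12c`, `start_decoder.R12d`: the children's statements give the parent's
   UNCHANGED statement (so nothing above the parent — callers, compositions — is touched by the split). -/
import Vorbis.Spec.StartDecoderR12
import Vorbis.Spec.Units.start_decoder_R12
import Vorbis.Spec.Units.start_decoder_R12a
import Vorbis.Spec.Units.start_decoder_R12b
import Vorbis.Spec.Units.start_decoder_R12c
import Vorbis.Spec.Units.start_decoder_R12d
namespace Vorbis.Spec.Splits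
open X86 X86.User Asan

/-- The children of the split unit `start_decoder.R12` prove it, by `Vorbis.Spec.StartDecoder.SegR12.of_parts`. -/
theorem start_decoder_R12
    (h_start_decoder_R12a : Vorbis.Spec.start_decoder_R12a.Statement)
    (h_start_decoder_R12b : Vorbis.Spec.start_decoder_R12b.Statement)
    (h_start_decoder_R12c : Vorbis.Spec.start_decoder_R12c.Statement)
    (h_start_decoder_R12d : Vorbis.Spec.start_decoder_R12d.Statement) :
    Vorbis.Spec.start_decoder_R12.Statement := by
  intro Lay _hLay μ _hμ u₀ _hcode _h_get_bits _h_asan_store1_noabort _h_asan_load1_noabort _h_asan_load4_noabort _h_error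
  apply Vorbis.Spec.StartDecoder.SegR12.of_parts
  · exact h_start_decoder_R12a Lay _hLay μ _hμ u₀ _hcode _h_get_bits
  · exact h_start_decoder_R12b Lay _hLay μ _hμ u₀ _hcode _h_get_bits
  · exact h_start_decoder_R12c Lay _hLay μ _hμ u₀ _hcode _h_get_bits _h_asan_store1_noabort
  · exact h_start_decoder_R12d Lay _hLay μ _hμ u₀ _hcode _h_asan_store1_noabort _h_asan_load1_noabort _h_asan_load4_noabort _h_error

end Vorbis.Spec.Splits
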